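-- pv_equiv track=rewrite | github.com/weibin2537/futures-knowledge-graph | models/model_training.py | _char_to_token_positions
-- ===== SOURCE A (Python) =====
-- def _char_to_token_positions(text, tokens, start_char, end_char):
--     """
--     将字符位置转换为token位置
--
--     Args:
--         text: 原始文本
--         tokens: 分词后的tokens
--         start_char: 实体起始字符位置
--         end_char: 实体结束字符位置
--
--     Returns:
--         tuple: (起始token索引, 结束token索引)
--     """
--     # 这是一个简化的实现，真实情况更复杂，需要考虑分词器的特性
--     current_pos = 0
--     token_start = None
--     token_end = None
--
--     for i, token in enumerate(tokens):
--         # 移除可能的特殊字符前缀(如##)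
--         clean_token = token.replace("##", "")
--         if token.startswith("##"):
--             # 如果是wordpiece分词的一部分，不增加current_pos
--             pass
--         else:
--             # 找到token在原文中的位置
--             while current_pos < len(text) and text[current_pos].isspace():
--                 current_pos += 1
--
--         token_len = len(clean_token)
--
--         # 检查token是否覆盖了实体起始位置
--         if token_start is None and current_pos <= start_char < current_pos + token_len:
--             token_start = i
--
--         # 检查token是否覆盖了实体结束位置
--         if token_end is None and current_pos <= end_char <= current_pos + token_len:
--             token_end = i
--             break
--
--         current_pos += token_len
--
--     return token_start, token_end
-- ===== SOURCE B (Python) =====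
-- def _char_to_token_positions(text, tokens, start_char, end_char):
--     # Two-phase: build an (offset, length) table once, then scan it for end and start.
--     table = []
--     pos = 0
--     for token in tokens:
--         clean = token.replace("##", "")
--         if not token.startswith("##"):
--             while pos < len(text) and text[pos].isspace():
--                 pos += 1
--         table.append((pos, len(clean)))
--         pos += len(clean)
--
--     token_end = next((i for i, (p, l) in enumerate(table)
--                       if p <= end_char <= p + l), None)
--     search = table if token_end is None else table[:token_end + 1]
--     token_start = next((i for i, (p, l) in enumerate(search)
--                         if p <= start_char < p + l), None)
--     return token_start, token_end
-- ===== Notes on version B (the rewrite author's own statement) =====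
-- stated objective: alternative
-- what changed: B replaces A's single stateful loop (running position, early break, in-loop flag updates) with two phases: one pass builds an (offset,length) table for all tokens, then token_end and token_start are found by two independent index scans, the start scan bounded by token_end's index.
import Mathlib
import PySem

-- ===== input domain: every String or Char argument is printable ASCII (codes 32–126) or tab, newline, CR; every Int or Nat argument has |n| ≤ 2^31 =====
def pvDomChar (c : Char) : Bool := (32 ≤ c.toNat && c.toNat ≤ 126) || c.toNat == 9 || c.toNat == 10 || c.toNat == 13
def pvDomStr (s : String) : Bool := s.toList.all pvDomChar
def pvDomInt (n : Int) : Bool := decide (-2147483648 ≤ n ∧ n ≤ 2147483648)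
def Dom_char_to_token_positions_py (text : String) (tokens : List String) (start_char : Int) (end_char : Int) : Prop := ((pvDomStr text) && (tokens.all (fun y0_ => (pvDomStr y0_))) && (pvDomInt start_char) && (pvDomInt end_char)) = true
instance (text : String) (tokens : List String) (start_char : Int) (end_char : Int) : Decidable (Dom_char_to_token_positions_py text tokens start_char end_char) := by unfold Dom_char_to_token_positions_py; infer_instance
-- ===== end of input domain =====

-- B rebuilds the same answer in two phases (an (offset,length) table, then two index scans)
-- instead of A's single stateful loop; objective: alternative decomposition, same cost.

set_option maxHeartbeats 1000000

-- ===== PORT A =====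
-- the inner `while current_pos < len(text) and text[current_pos].isspace(): current_pos += 1`
def pvSkipWs (text : List Char) (pos : Nat) : Nat :=
  if h : pos < text.length then
    if PySem.Chars.isspace text[pos] then pvSkipWs text (pos + 1) else pos
  else pos
termination_by text.length - pos

-- A's for-loop: state = (index i, current_pos, token_start); `break` = returning right away
def pvALoop (text : List Char) (start_char end_char : Int) :
    List String → Nat → Nat → Option Int → Option Int × Option Int
  | [], _, _, ts => (ts, none)
  | tok :: rest, i, pos, ts =>
    let cleanLen := (PySem.Str.replace tok "##" "").length
    let pos := if PySem.Str.startswith tok "##" then pos else pvSkipWs text pos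
    let ts := if ts = none ∧ (pos : Int) ≤ start_char ∧ start_char < (pos : Int) + cleanLen
              then some (i : Int) else ts
    if (pos : Int) ≤ end_char ∧ end_char ≤ (pos : Int) + cleanLen then (ts, some (i : Int))
    else pvALoop text start_char end_char rest (i + 1) (pos + cleanLen) ts

def char_to_token_positions_py (text : String) (tokens : List String) (start_char : Int) (end_char : Int) : Option Int × Option Int :=
  pvALoop text.toList start_char end_char tokens 0 0 none

-- ===== PORT B =====
-- phase 1: the (offset, length) table
def pvTable (text : List Char) : List String → Nat → List (Nat × Nat)
  | [], _ => []
  | tok :: rest, pos =>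
    let clean := PySem.Str.replace tok "##" ""
    let pos := if PySem.Str.startswith tok "##" then pos else pvSkipWs text pos
    (pos, clean.length) :: pvTable text rest (pos + clean.length)

def char_to_token_positions_py_alt (text : String) (tokens : List String) (start_char : Int) (end_char : Int) : Option Int × Option Int :=
  let table := pvTable text.toList tokens 0
  -- phase 2: first index covering end_char, then first index covering start_char (bounded by token_end)
  let te := table.findIdx? (fun pl => decide ((pl.1 : Int) ≤ end_char ∧ end_char ≤ (pl.1 : Int) + pl.2))
  let search := match te with
    | none => table
    | some j => table.take (j + 1)
  let ts := search.findIdx? (fun pl => decide ((pl.1 : Int) ≤ start_char ∧ start_char < (pl.1 : Int) + pl.2))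
  (ts.map (fun k => (k : Int)), te.map (fun j => (j : Int)))

-- ===== PRECONDITION & SPEC =====
def Spec_char_to_token_positions_py (text : String) (tokens : List String) (start_char : Int) (end_char : Int) (out : Option Int × Option Int) : Prop := out = char_to_token_positions_py_alt text tokens start_char end_char
instance (text : String) (tokens : List String) (start_char : Int) (end_char : Int) (out : Option Int × Option Int) : Decidable (Spec_char_to_token_positions_py text tokens start_char end_char out) := by unfold Spec_char_to_token_positions_py; infer_instance

-- ===== CLAIM (what is proved, stated in full; the proofs are below) =====
def Claim_equal_char_to_token_positions_py : Prop := ∀ (text : String) (tokens : List String) (start_char : Int) (end_char : Int), Dom_char_to_token_positions_py text tokens start_char end_char → Spec_char_to_token_positions_py text tokens start_char end_char (char_to_token_positions_py text tokens start_char end_char)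

-- ===== LEMMAS AND PROOFS =====

theorem pvALoop_eq_table (text : List Char) (start_char end_char : Int)
    (toks : List String) : ∀ (i pos : Nat) (ts : Option Int),
    pvALoop text start_char end_char toks i pos ts =
      (let tbl := pvTable text toks pos
       let te := tbl.findIdx? (fun pl => decide ((pl.1 : Int) ≤ end_char ∧ end_char ≤ (pl.1 : Int) + pl.2))
       let search := match te with
         | none => tbl
         | some j => tbl.take (j + 1)
       ((match ts with
         | some v => some v
         | none => (search.findIdx? (fun pl => decide ((pl.1 : Int) ≤ start_char ∧ start_char < (pl.1 : Int) + pl.2))).map (fun k => ((i + k : Nat) : Int))),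
        te.map (fun j => ((i + j : Nat) : Int)))) := by
  induction toks with
  | nil => intro i pos ts; cases ts <;> simp [pvALoop, pvTable]
  | cons tok rest ih =>
    intro i pos ts
    simp only [pvALoop, pvTable]
    set p := if PySem.Str.startswith tok "##" then pos else pvSkipWs text pos with hp
    set L := (PySem.Str.replace tok "##" "").length with hL
    by_cases hE : (p : Int) ≤ end_char ∧ end_char ≤ (p : Int) + L
    · simp only [hE, List.findIdx?_cons, decide_eq_true_eq]
      by_cases hS : (p : Int) ≤ start_char ∧ start_char < (p : Int) + L
      · cases ts <;> simp [hS, List.findIdx?_cons]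
      · cases ts <;> simp [hS, List.findIdx?_cons]
    · rw [ih]
      cases hfe : List.findIdx? (fun pl => decide ((pl.1 : Int) ≤ end_char) && decide (end_char ≤ (pl.1 : Int) + pl.2)) (pvTable text rest (p + L)) with
      | none =>
        cases ts with
        | some v => simp [hE, List.findIdx?_cons, hfe]
        | none =>
          by_cases hS : (p : Int) ≤ start_char ∧ start_char < (p : Int) + L <;>
            simp [hS, hE, List.findIdx?_cons, hfe] <;>
            (cases List.findIdx? (fun pl => decide ((pl.1 : Int) ≤ start_char) && decide (start_char < (pl.1 : Int) + pl.2)) (pvTable text rest (p + L)) <;> simp <;> push_cast <;> ring)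
      | some j =>
        cases ts with
        | some v =>
          simp [hE, List.findIdx?_cons, hfe]
          push_cast; ring
        | none =>
          by_cases hS : (p : Int) ≤ start_char ∧ start_char < (p : Int) + L <;>
            simp [hS, hE, List.findIdx?_cons, hfe, List.take_succ_cons] <;>
            (try refine ⟨?_, ?_⟩) <;>
            (first
              | (refine Option.bind_congr fun a _ => ?_
                 cases Option.guard (fun b => decide (b ≤ j)) a <;> simp <;> omega)
              | (push_cast; ring)
              | omega
              | rfl)

-- ===== VERDICT (by name: the statement is the Claim_ definition above) =====
theorem char_to_token_positions_py_spec : Claim_equal_char_to_token_positions_py := by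
  intro text tokens start_char end_char _
  unfold Spec_char_to_token_positions_py char_to_token_positions_py char_to_token_positions_py_alt
  rw [pvALoop_eq_table]
  simp [Option.map_eq_bind]
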